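-- pv_equiv track=rewrite | github.com/ElefHead/Reversi | reversi.py | hasDiagonalDownLeft
-- ===== SOURCE A (Python) =====
-- def hasDiagonalDownLeft(board,position,tile):
-- 	opponent_tile = 1 if tile==2 else 2
-- 	found_opponent = False
-- 	i,j = position[0]+1,position[1]-1
-- 	while(i<8 and j>=0):
-- 		if board[i][j] == opponent_tile:
-- 			found_opponent = True
-- 			i,j = i+1,j-1
-- 		else:
-- 			break
-- 	if found_opponent and i<8 and j>=0:
-- 		if board[i][j] == tile:
-- 			return True
-- 	return False
-- ===== SOURCE B (Python) =====
-- def hasDiagonalDownLeft(board, position, tile):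
--     opponent = 1 if tile == 2 else 2
--     cells = []
--     i, j = position[0] + 1, position[1] - 1
--     while i < 8 and j >= 0:
--         cells.append(board[i][j])
--         i, j = i + 1, j - 1
--     count = 0
--     for c in cells:
--         if c != opponent:
--             break
--         count += 1
--     return 0 < count < len(cells) and cells[count] == tile
-- ===== Notes on version B (the rewrite author's own statement) =====
-- stated objective: alternative
-- what changed: B replaces A's single break-driven stateful walk by three separate phases: materialize the whole down-left ray as a list, count its leading run of opponent tiles, then do one bracket check count>0 and count<len(cells) and cells[count]==tile.
-- outside the precondition, e.g. on hasDiagonalDownLeft([[7, 7, 4], [7, 7]], (-1, 3), 2): A returns False, B raises IndexError; on hasDiagonalDownLeft([[1], [2]], (-3, 1), 2): A returns False, B returns False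
import Mathlib
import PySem

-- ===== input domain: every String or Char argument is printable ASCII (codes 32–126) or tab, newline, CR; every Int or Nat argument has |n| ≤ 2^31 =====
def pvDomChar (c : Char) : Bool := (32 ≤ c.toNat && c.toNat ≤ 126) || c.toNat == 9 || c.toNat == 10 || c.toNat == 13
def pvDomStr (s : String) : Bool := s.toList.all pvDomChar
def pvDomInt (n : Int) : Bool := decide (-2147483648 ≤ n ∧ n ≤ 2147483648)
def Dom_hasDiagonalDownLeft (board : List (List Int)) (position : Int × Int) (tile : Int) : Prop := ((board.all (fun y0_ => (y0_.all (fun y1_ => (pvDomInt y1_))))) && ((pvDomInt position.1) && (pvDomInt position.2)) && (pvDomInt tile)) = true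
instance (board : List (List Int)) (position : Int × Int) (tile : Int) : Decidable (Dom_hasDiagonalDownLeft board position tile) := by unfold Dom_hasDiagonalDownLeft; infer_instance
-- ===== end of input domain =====

-- B splits A's break-driven walk into three phases (materialize the ray, count leading opponents, one bracket check); alternative decomposition, same cost.

-- ===== PORT A =====
-- board[i][j]; outside Pre_ (index error) a default 0 / [] is returned where Python raises.
def pvCell (board : List (List Int)) (i j : Int) : Int :=
  ((PySem.List.pyGet? ((PySem.List.pyGet? board i).getD []) j).getD 0)

-- A's while loop; fuel 16 covers every run admitted by Pre_ (at most 8 steps), returns (i, j, found_opponent).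
def pvLoopA (board : List (List Int)) (opp : Int) : Nat → Int → Int → Bool → Int × Int × Bool
  | 0, i, j, found => (i, j, found)
  | fuel + 1, i, j, found =>
    if i < 8 ∧ j ≥ 0 then
      if pvCell board i j == opp then pvLoopA board opp fuel (i + 1) (j - 1) true
      else (i, j, found)
    else (i, j, found)

def hasDiagonalDownLeft (board : List (List Int)) (position : Int × Int) (tile : Int) : Bool :=
  let opp : Int := if tile == 2 then 1 else 2
  let r := pvLoopA board opp 16 (position.1 + 1) (position.2 - 1) false
  if r.2.2 = true ∧ r.1 < 8 ∧ r.2.1 ≥ 0 then pvCell board r.1 r.2.1 == tile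
  else false

-- ===== PORT B =====
-- phase 1: materialize the whole down-left ray (same fuel bound as A's loop)
def pvRay (board : List (List Int)) : Nat → Int → Int → List Int
  | 0, _, _ => []
  | fuel + 1, i, j =>
    if i < 8 ∧ j ≥ 0 then pvCell board i j :: pvRay board fuel (i + 1) (j - 1)
    else []

-- phase 2: length of the leading run of opponent tiles
def pvCount (opp : Int) : List Int → Nat
  | [] => 0
  | c :: cs => if c != opp then 0 else pvCount opp cs + 1

def hasDiagonalDownLeft_alt (board : List (List Int)) (position : Int × Int) (tile : Int) : Bool :=
  let opp : Int := if tile == 2 then 1 else 2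
  let cells := pvRay board 16 (position.1 + 1) (position.2 - 1)
  let count := pvCount opp cells
  decide (0 < count) && (decide (count < cells.length) && (cells.getD count 0 == tile))

-- ===== PRECONDITION & SPEC =====
-- Pre_ excludes inputs whose down-left ray starts at a negative row index (A then relies on
-- Python's negative-index wraparound; B wraps the same way on the cells A reads but its full-ray
-- walk can raise further along) and inputs whose ray leaves the board, where B's ray
-- materialization raises IndexError although A's early break can still return.
def Pre_hasDiagonalDownLeft (board : List (List Int)) (position : Int × Int) (tile : Int) : Prop :=
  ∀ k : Nat, k < 8 →
    (position.1 + 1 + (k : Int) < 8 ∧ position.2 - 1 - (k : Int) ≥ 0) →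
    (0 ≤ position.1 + 1 + (k : Int) ∧
     position.1 + 1 + (k : Int) < (board.length : Int) ∧
     position.2 - 1 - (k : Int) < ((board.getD (position.1 + 1 + (k : Int)).toNat []).length : Int))
instance (board : List (List Int)) (position : Int × Int) (tile : Int) : Decidable (Pre_hasDiagonalDownLeft board position tile) := by unfold Pre_hasDiagonalDownLeft; infer_instance

def pvWitness_hasDiagonalDownLeft : List (List Int) × (Int × Int) × Int :=
  ([[0, 0, 0], [1, 0, 0], [2, 0, 0]], (0, 2), 2)

def Spec_hasDiagonalDownLeft (board : List (List Int)) (position : Int × Int) (tile : Int) (out : Bool) : Prop := out = hasDiagonalDownLeft_alt board position tile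
instance (board : List (List Int)) (position : Int × Int) (tile : Int) (out : Bool) : Decidable (Spec_hasDiagonalDownLeft board position tile out) := by unfold Spec_hasDiagonalDownLeft; infer_instance

-- ===== CLAIM (what is proved, stated in full; the proofs are below) =====
def Claim_equal_hasDiagonalDownLeft : Prop := ∀ (board : List (List Int)) (position : Int × Int) (tile : Int), Dom_hasDiagonalDownLeft board position tile → Pre_hasDiagonalDownLeft board position tile → Spec_hasDiagonalDownLeft board position tile (hasDiagonalDownLeft board position tile)

-- ===== LEMMAS AND PROOFS =====

-- A's loop state, expressed through B's ray and leading-run count.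
theorem pvLoopA_eq_ray (board : List (List Int)) (opp : Int) :
    ∀ (fuel : Nat) (i j : Int) (found : Bool),
      pvLoopA board opp fuel i j found =
        (i + (pvCount opp (pvRay board fuel i j) : Int),
         j - (pvCount opp (pvRay board fuel i j) : Int),
         found || decide (0 < pvCount opp (pvRay board fuel i j))) := by
  intro fuel
  induction fuel with
  | zero => intro i j found; simp [pvLoopA, pvRay, pvCount]
  | succ n ih =>
    intro i j found
    by_cases h : i < 8 ∧ j ≥ 0
    · by_cases hc : pvCell board i j = opp
      · simp [pvLoopA, pvRay, pvCount, h, hc, ih]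
        omega
      · simp [pvLoopA, pvRay, pvCount, h, hc]
    · simp [pvLoopA, pvRay, pvCount, h]

theorem pvRay_length_iff (board : List (List Int)) :
    ∀ (fuel : Nat) (i j : Int) (k : Nat), 8 ≤ i + (fuel : Int) →
      (k < (pvRay board fuel i j).length ↔ (i + (k : Int) < 8 ∧ 0 ≤ j - (k : Int))) := by
  intro fuel
  induction fuel with
  | zero =>
    intro i j k h
    simp [pvRay]
    intro hk
    omega
  | succ n ih =>
    intro i j k h
    by_cases hc : i < 8 ∧ j ≥ 0
    · cases k with
      | zero => simp [pvRay, hc]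
      | succ m =>
        have := ih (i + 1) (j - 1) m (by push_cast at h ⊢; omega)
        simp only [pvRay, if_pos hc, List.length_cons]
        constructor
        · intro hm
          have := this.mp (by omega)
          push_cast
          push_cast at this
          omega
        · intro hm
          have : m < (pvRay board n (i + 1) (j - 1)).length := by
            apply this.mpr
            push_cast at hm ⊢
            omega
          omega
    · simp only [pvRay, if_neg hc, List.length_nil]
      constructor
      · intro hk
        exact absurd hk (by omega)
      · rintro ⟨h1, h2⟩
        exact absurd h1 (by rcases not_and_or.mp hc with h' | h' <;> omega)

theorem pvRay_getD (board : List (List Int)) :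
    ∀ (fuel : Nat) (i j : Int) (k : Nat), k < (pvRay board fuel i j).length →
      (pvRay board fuel i j).getD k 0 = pvCell board (i + (k : Int)) (j - (k : Int)) := by
  intro fuel
  induction fuel with
  | zero => intro i j k h; simp [pvRay] at h
  | succ n ih =>
    intro i j k h
    by_cases hc : i < 8 ∧ j ≥ 0
    · cases k with
      | zero => simp [pvRay, hc]
      | succ m =>
        simp only [pvRay, if_pos hc, List.length_cons] at h
        have := ih (i + 1) (j - 1) m (by omega)
        simp only [pvRay, if_pos hc, List.getD_cons_succ]
        rw [this]
        push_cast
        ring_nf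
    · simp [pvRay, hc] at h

theorem pvCount_le_length (opp : Int) : ∀ (xs : List Int), pvCount opp xs ≤ xs.length := by
  intro xs
  induction xs with
  | nil => simp [pvCount]
  | cons c cs ih =>
    by_cases h : c != opp
    · simp [pvCount, h]
    · simp [pvCount, h]; omega

-- ===== VERDICT (by name: the statement is the Claim_ definition above) =====
theorem hasDiagonalDownLeft_spec : Claim_equal_hasDiagonalDownLeft := by
  intro board position tile _ hpre
  unfold Spec_hasDiagonalDownLeft hasDiagonalDownLeft hasDiagonalDownLeft_alt
  simp only [pvLoopA_eq_ray]
  set opp : Int := if tile == 2 then 1 else 2 with hopp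
  set i0 : Int := position.1 + 1 with hi0
  set j0 : Int := position.2 - 1 with hj0
  set cells := pvRay board 16 i0 j0 with hcells
  set c := pvCount opp cells with hc
  by_cases hstart : i0 < 8 ∧ j0 ≥ 0
  · -- the loop/ray is entered; Pre_ at k = 0 gives 0 ≤ i0
    have h0 : 0 ≤ i0 := by
      have := hpre 0 (by omega) (by constructor <;> (push_cast; omega))
      have h1 := this.1
      push_cast at h1
      omega
    have hfuel : (8 : Int) ≤ i0 + ((16 : Nat) : Int) := by push_cast; omega
    have hle : c ≤ cells.length := pvCount_le_length opp cells
    have hiff : c < cells.length ↔ (i0 + (c : Int) < 8 ∧ 0 ≤ j0 - (c : Int)) :=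
      pvRay_length_iff board 16 i0 j0 c hfuel
    by_cases hpos : 0 < c
    · by_cases hcond : i0 + (c : Int) < 8 ∧ 0 ≤ j0 - (c : Int)
      · have hlen : c < cells.length := hiff.mpr hcond
        have hget := pvRay_getD board 16 i0 j0 c hlen
        rw [if_pos ⟨by simp [hpos], by omega, by omega⟩]
        have hget' : cells.getD c 0 = pvCell board (i0 + (c : Int)) (j0 - (c : Int)) := hget
        rw [hget']
        simp [hlen, hpos]
      · have hlen : ¬ c < cells.length := fun h => hcond (hiff.mp h)
        rw [if_neg (by rintro ⟨-, h1, h2⟩; exact hcond ⟨h1, by omega⟩)]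
        simp [hlen]
    · rw [if_neg (by rintro ⟨hb, -⟩; simp [hpos] at hb)]
      simp [hpos]
  · -- ray empty: both sides are false
    have hray : cells = [] := by
      rw [hcells]
      show pvRay board (15 + 1) i0 j0 = []
      simp [pvRay, hstart]
    have hc0 : c = 0 := by rw [hc, hray]; rfl
    rw [if_neg (by rintro ⟨hb, -⟩; simp [hc0] at hb)]
    simp [hc0]
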